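-- pv_equiv track=rewrite | github.com/ryanquinnnelson/CMU-02699-Image-Segmentation-via-GANs-v2 | customized/models.py | _generate_channels_lists
-- ===== SOURCE A (Python) =====
-- def _generate_channels_lists(in_channels, block_pattern, block_depth):
--     in_channels_list = []
--     out_channels_list = []
--
--     # calculate channels sizes for block based on block pattern
--     current_in_channels = in_channels
--     current_out_channels = None
--     if block_pattern == 'single_run':
--
--         # out_channel is 2x the in_channel of that layer
--         # for block_depth = 3
--         # in_channels_list  [ 64, 128, 256]
--         # out_channels_list [128, 256, 512]
--         for each in range(block_depth):
--             # in channels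
--             in_channels_list.append(current_in_channels)  # match output channels of previous layer
--             current_out_channels = current_in_channels * 2  # output is 2x the input
--
--             # out channels
--             out_channels_list.append(current_out_channels)
--             current_in_channels = current_out_channels
--
--     elif block_pattern == 'double_run':
--
--         # odd layers have in_channels and out_channels that are the same value
--         # even layers have out_channel = 2 * in_channel
--         # for block_depth = 4
--         # in_channels_list  [64,  64, 128, 128]
--         # out_channels_list [64, 128, 128, 256]
--         current_in_channels = in_channels
--         current_out_channels = current_in_channels
--         is_symmetrical_layer = True
--         for each in range(block_depth):
--
--             # in channels
--             in_channels_list.append(current_in_channels)  # match output channels of previous layer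
--
--             if is_symmetrical_layer:
--                 current_out_channels = current_in_channels
--             else:
--                 current_out_channels = current_in_channels * 2
--
--             # toggle opposite rule for next layer
--             is_symmetrical_layer = not is_symmetrical_layer
--
--             # out channels
--             out_channels_list.append(current_out_channels)
--             current_in_channels = current_out_channels
--
--     return in_channels_list, out_channels_list
-- ===== SOURCE B (Python) =====
-- def _generate_channels_lists(in_channels, block_pattern, block_depth):
--     # closed-form per index instead of a stateful doubling loop
--     if block_pattern == 'single_run':
--         return ([in_channels * 2 ** i for i in range(block_depth)],
--                 [in_channels * 2 ** (i + 1) for i in range(block_depth)])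
--     if block_pattern == 'double_run':
--         return ([in_channels * 2 ** (i // 2) for i in range(block_depth)],
--                 [in_channels * 2 ** ((i + 1) // 2) for i in range(block_depth)])
--     return [], []
-- ===== Notes on version B (the rewrite author's own statement) =====
-- stated objective: simpler
-- what changed: Replaced the stateful doubling loops (running channel value, append, toggle flag) with per-index closed-form comprehensions in_channels * 2**i (and i//2 variants for double_run).
import Mathlib
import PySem

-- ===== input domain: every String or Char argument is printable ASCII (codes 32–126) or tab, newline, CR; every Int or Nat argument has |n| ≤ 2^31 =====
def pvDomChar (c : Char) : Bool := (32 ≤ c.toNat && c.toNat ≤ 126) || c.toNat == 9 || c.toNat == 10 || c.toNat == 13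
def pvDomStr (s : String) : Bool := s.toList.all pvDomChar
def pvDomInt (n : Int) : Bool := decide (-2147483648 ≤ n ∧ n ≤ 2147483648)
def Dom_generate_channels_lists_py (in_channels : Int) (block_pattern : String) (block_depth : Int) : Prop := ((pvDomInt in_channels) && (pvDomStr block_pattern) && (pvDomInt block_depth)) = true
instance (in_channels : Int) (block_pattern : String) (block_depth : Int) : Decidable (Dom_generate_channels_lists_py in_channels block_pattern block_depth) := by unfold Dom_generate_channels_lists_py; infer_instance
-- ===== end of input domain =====

-- B replaces A's stateful doubling loops with per-index closed forms (in_channels * 2^i,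
-- and floor-halved exponents for 'double_run'); objective: simpler, same O(n) cost.


-- ===== PORT A =====
-- literal transliteration: two stateful loops over range(block_depth), each appending to the
-- accumulated lists and carrying the running channel value (and, for double_run, the toggle flag)
def generate_channels_lists_py (in_channels : Int) (block_pattern : String) (block_depth : Int) : List Int × List Int :=
  if block_pattern == "single_run" then
    let s := (PySem.List.pyRange 0 block_depth 1).foldl
      (fun (st : List Int × List Int × Int) _ =>
        let current_out := st.2.2 * 2
        (st.1 ++ [st.2.2], st.2.1 ++ [current_out], current_out))
      ([], [], in_channels)
    (s.1, s.2.1)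
  else if block_pattern == "double_run" then
    let s := (PySem.List.pyRange 0 block_depth 1).foldl
      (fun (st : List Int × List Int × Int × Bool) _ =>
        let current_out := if st.2.2.2 then st.2.2.1 else st.2.2.1 * 2
        (st.1 ++ [st.2.2.1], st.2.1 ++ [current_out], current_out, !st.2.2.2))
      ([], [], in_channels, true)
    (s.1, s.2.1)
  else ([], [])

-- ===== PORT B =====
-- literal transliteration of Source B: comprehensions over range(block_depth) of closed forms
-- (i ≥ 0 inside range, so 2 ** i is ported as 2 ^ i.toNat and i // 2 as i.toNat / 2)
def generate_channels_lists_py_alt (in_channels : Int) (block_pattern : String) (block_depth : Int) : List Int × List Int :=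
  if block_pattern == "single_run" then
    ((PySem.List.pyRange 0 block_depth 1).map (fun i => in_channels * 2 ^ i.toNat),
     (PySem.List.pyRange 0 block_depth 1).map (fun i => in_channels * 2 ^ (i.toNat + 1)))
  else if block_pattern == "double_run" then
    ((PySem.List.pyRange 0 block_depth 1).map (fun i => in_channels * 2 ^ (i.toNat / 2)),
     (PySem.List.pyRange 0 block_depth 1).map (fun i => in_channels * 2 ^ ((i.toNat + 1) / 2)))
  else ([], [])

-- ===== PRECONDITION & SPEC =====
def Spec_generate_channels_lists_py (in_channels : Int) (block_pattern : String) (block_depth : Int) (out : List Int × List Int) : Prop := out = generate_channels_lists_py_alt in_channels block_pattern block_depth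
instance (in_channels : Int) (block_pattern : String) (block_depth : Int) (out : List Int × List Int) : Decidable (Spec_generate_channels_lists_py in_channels block_pattern block_depth out) := by unfold Spec_generate_channels_lists_py; infer_instance

-- ===== CLAIM (what is proved, stated in full; the proofs are below) =====
def Claim_equal_generate_channels_lists_py : Prop := ∀ (in_channels : Int) (block_pattern : String) (block_depth : Int), Dom_generate_channels_lists_py in_channels block_pattern block_depth → Spec_generate_channels_lists_py in_channels block_pattern block_depth (generate_channels_lists_py in_channels block_pattern block_depth)

-- ===== LEMMAS AND PROOFS =====

-- invariant of A's single_run loop: after n steps from channel value c the lists hold c·2^j / c·2^(j+1)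
theorem single_run_loop (c : Int) (il ol : List Int) (n : Nat) :
    (List.range n).foldl
      (fun (st : List Int × List Int × Int) (_ : Nat) =>
        let current_out := st.2.2 * 2
        (st.1 ++ [st.2.2], st.2.1 ++ [current_out], current_out))
      (il, ol, c)
    = (il ++ (List.range n).map (fun j => c * 2 ^ j),
       ol ++ (List.range n).map (fun j => c * 2 ^ (j + 1)),
       c * 2 ^ n) := by
  induction n with
  | zero => simp
  | succ n ih =>
    rw [List.range_succ, List.foldl_append, ih]
    simp [pow_succ]
    ring

-- invariant of A's double_run loop: after n steps the running value is c·2^(n/2) and the flag is the parity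
theorem double_run_loop (c : Int) (il ol : List Int) (n : Nat) :
    (List.range n).foldl
      (fun (st : List Int × List Int × Int × Bool) (_ : Nat) =>
        let current_out := if st.2.2.2 then st.2.2.1 else st.2.2.1 * 2
        (st.1 ++ [st.2.2.1], st.2.1 ++ [current_out], current_out, !st.2.2.2))
      (il, ol, c, true)
    = (il ++ (List.range n).map (fun j => c * 2 ^ (j / 2)),
       ol ++ (List.range n).map (fun j => c * 2 ^ ((j + 1) / 2)),
       c * 2 ^ (n / 2),
       decide (n % 2 = 0)) := by
  induction n with
  | zero => simp
  | succ n ih =>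
    rw [List.range_succ, List.foldl_append, ih]
    simp only [List.foldl_cons, List.foldl_nil, List.map_append, List.map_cons,
      List.map_nil, List.append_assoc]
    rcases Nat.even_or_odd n with he | ho
    · obtain ⟨m, hm⟩ := he
      subst hm
      have h1 : (m + m) % 2 = 0 := by omega
      have h2 : (m + m + 1) % 2 = 0 → False := by omega
      have h3 : (m + m + 1) / 2 = m := by omega
      have h4 : (m + m + 1 + 1) / 2 = m + 1 := by omega
      have h0 : (m + m) / 2 = m := by omega
      simp [h1, h3, h0]
      omega
    · obtain ⟨m, hm⟩ := ho
      subst hm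
      have h1 : ¬ ((2 * m + 1) % 2 = 0) := by omega
      have h2 : (2 * m + 1 + 1) / 2 = m + 1 := by omega
      have h3 : (2 * m + 1 + 1 + 1) / 2 = m + 1 := by omega
      have h4 : (2 * m + 1) / 2 = m := by omega
      have h5 : (2 * m + 1 + 1) % 2 = 0 := by omega
      simp [h2, h4, h5, pow_succ]
      ring

-- ===== VERDICT (by name: the statement is the Claim_ definition above) =====
theorem generate_channels_lists_py_spec : Claim_equal_generate_channels_lists_py := by
  intro ic bp bd _
  unfold Spec_generate_channels_lists_py generate_channels_lists_py generate_channels_lists_py_alt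
  rw [PySem.List.pyRange_zero]
  by_cases h1 : bp == "single_run"
  · simp only [h1, if_pos]
    rw [List.foldl_map, single_run_loop]
    simp [List.map_map, Function.comp]
  · by_cases h2 : bp == "double_run"
    · simp only [h1, h2, if_neg, if_pos, Bool.false_eq_true, not_false_iff]
      rw [List.foldl_map, double_run_loop]
      simp [List.map_map, Function.comp]
    · simp [h1, h2]
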